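-- pv_equiv track=rewrite | github.com/SamuelOnGitHub/Scrabbling_about_on_the_floor | UniqueDeckCounter.py | incrementDeckOrdered
-- ===== SOURCE A (Python) =====
-- letterFrequencies = {"A": 9,"B": 2,"C": 2,"D": 4,"E": 12,"F": 2,"G": 3,"H": 2,"I": 9,"J": 1,"K": 1,"L": 4,"M": 2,"N": 6,"O": 8,"P": 2,"Q": 1,"R": 6,"S": 4,"T": 6,"U": 4,"V": 2,"W": 2,"X": 1,"Y": 2,"Z": 1,"_": 2}
--
-- alphabet = "ABCDEFGHIJKLMNOPQRSTUVWXYZ_"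
--
-- def incrementDeckOrdered(predeck, deckSize):
--
--     if len(predeck) == 0:
--         return predeck
--
--     lastCharacter = predeck[-1]
--     indexOfNext = alphabet.find(lastCharacter) + 1
--
--     placed = False
--     while not placed:
--         if indexOfNext >= len(alphabet):
--             carriedDeck = incrementDeckOrdered(predeck[:-1], deckSize)
--             for c in alphabet:
--                 potentialDeck = carriedDeck + c
--                 if inOrder(potentialDeck) and potentialDeck.count(c) <= letterFrequencies[c]:
--                     return potentialDeck
--         else:
--             newLastChar = alphabet[indexOfNext]
--             potentialDeck = predeck[:-1] + newLastChar
--             if inOrder(potentialDeck) and potentialDeck.count(newLastChar) <= letterFrequencies[newLastChar] and numberOfFollowers(potentialDeck) >= deckSize - len(potentialDeck):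
--                 placed = True
--                 return potentialDeck
--             else:
--                 indexOfNext += 1
--
-- def numberOfFollowers(deck):
--     lastCharacter = deck[-1]
--     lastCharIndex = alphabet.find(lastCharacter)
--     count = 0
--     for i in range(lastCharIndex, len(alphabet)):
--         followingChar = alphabet[i]
--         count += letterFrequencies[followingChar] - deck.count(followingChar)
--     return count
--
-- def inOrder(deck):
--     for i in range(1, len(deck)):
--         if alphabet.find(deck[i]) < alphabet.find(deck[i-1]):
--             return False
--     return True
-- ===== SOURCE B (Python) =====
-- letterFrequencies = {"A": 9,"B": 2,"C": 2,"D": 4,"E": 12,"F": 2,"G": 3,"H": 2,"I": 9,"J": 1,"K": 1,"L": 4,"M": 2,"N": 6,"O": 8,"P": 2,"Q": 1,"R": 6,"S": 4,"T": 6,"U": 4,"V": 2,"W": 2,"X": 1,"Y": 2,"Z": 1,"_": 2}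
--
-- alphabet = "ABCDEFGHIJKLMNOPQRSTUVWXYZ_"
--
--
-- def _tally(chars):
--     cnt = {}
--     for ch in chars:
--         cnt[ch] = cnt.get(ch, 0) + 1
--     return cnt
--
--
-- def _ordered(chars):
--     ranks = [alphabet.find(ch) for ch in chars]
--     return all(a <= b for a, b in zip(ranks, ranks[1:]))
--
--
-- def _followers(cnt, j):
--     # remaining copies of the letters at alphabet index >= j, counts taken from cnt
--     return sum(letterFrequencies[c] - cnt.get(c, 0) for c in alphabet[j:])
--
--
-- def _bump(prefix, start, deckSize):
--     # smallest letter at alphabet index >= start that can replace the last letter: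
--     # keeps the deck ordered, stays inside its frequency cap, and leaves enough
--     # followers to reach deckSize
--     if not _ordered(prefix):
--         return None
--     cnt = _tally(prefix)
--     n = len(prefix) + 1
--     floor = alphabet.find(prefix[-1]) if prefix else -1
--     j = max(start, floor, 0)
--     while j < len(alphabet):
--         c = alphabet[j]
--         if cnt.get(c, 0) + 1 <= letterFrequencies[c] and _followers(cnt, j) - 1 >= deckSize - n:
--             return c
--         j += 1
--     return None
--
--
-- def _extend(cur):
--     # smallest letter appendable to the ordered deck cur within its frequency cap
--     cnt = _tally(cur)
--     floor = alphabet.find(cur[-1]) if cur else -1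
--     j = max(floor, 0)
--     while j < len(alphabet):
--         c = alphabet[j]
--         if cnt.get(c, 0) < letterFrequencies[c]:
--             return c
--         j += 1
--     return None
--
--
-- def incrementDeckOrdered(predeck, deckSize):
--     if len(predeck) == 0:
--         return predeck
--     cur = list(predeck)
--     dropped = 0
--     # carry phase: walk positions right to left until one letter can be bumped
--     while cur:
--         c = _bump(cur[:-1], alphabet.find(cur[-1]) + 1, deckSize)
--         if c is not None:
--             cur[-1] = c
--             break
--         cur.pop()
--         dropped += 1
--     # extend phase: re-append the smallest admissible letter once per dropped position
--     while dropped > 0: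
--         c = _extend(cur)
--         if c is None:
--             return None  # no deck of this length follows (A loops forever here)
--         cur.append(c)
--         dropped -= 1
--     return ''.join(cur)
-- ===== Notes on version B (the rewrite author's own statement) =====
-- stated objective: alternative
-- what changed: Replaces A's recursion-over-prefix (inner candidate scan per recursive call, then one append per unwinding level) by an explicit iterative right-to-left carry loop followed by an append loop, with the candidate test rephrased through a per-level letter tally and a factored-out order check on the prefix instead of re-checking the whole extended deck per candidate.
import Mathlib
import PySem

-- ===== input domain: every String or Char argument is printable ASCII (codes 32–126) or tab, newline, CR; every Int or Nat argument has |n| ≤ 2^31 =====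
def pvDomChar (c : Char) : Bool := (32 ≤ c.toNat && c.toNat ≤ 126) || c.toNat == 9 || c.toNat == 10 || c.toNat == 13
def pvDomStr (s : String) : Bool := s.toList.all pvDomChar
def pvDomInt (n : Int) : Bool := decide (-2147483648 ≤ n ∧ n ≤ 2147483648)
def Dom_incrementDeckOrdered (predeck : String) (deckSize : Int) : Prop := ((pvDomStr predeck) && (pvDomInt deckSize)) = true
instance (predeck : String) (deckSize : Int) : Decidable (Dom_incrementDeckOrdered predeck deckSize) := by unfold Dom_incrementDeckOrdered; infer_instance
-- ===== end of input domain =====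

-- B replaces A's recursion-over-prefix by an iterative carry phase plus an append phase
-- driven by a per-level letter tally (objective: alternative decomposition, same cost).

-- ===== shared module constants (Python module globals used by both A and B) =====

def pvAlpha : List Char :=
  ['A','B','C','D','E','F','G','H','I','J','K','L','M',
   'N','O','P','Q','R','S','T','U','V','W','X','Y','Z','_']

-- letterFrequencies[c]; only letters of pvAlpha are ever looked up, so the
-- KeyError default case is unreachable at every call site.
def pvFreq (c : Char) : Int :=
  match c with
  | 'A' => 9 | 'B' => 2 | 'C' => 2 | 'D' => 4 | 'E' => 12 | 'F' => 2 | 'G' => 3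
  | 'H' => 2 | 'I' => 9 | 'J' => 1 | 'K' => 1 | 'L' => 4 | 'M' => 2 | 'N' => 6
  | 'O' => 8 | 'P' => 2 | 'Q' => 1 | 'R' => 6 | 'S' => 4 | 'T' => 6 | 'U' => 4
  | 'V' => 2 | 'W' => 2 | 'X' => 1 | 'Y' => 2 | 'Z' => 1 | '_' => 2 | _ => 0

-- alphabet.find(c) on a one-character needle (index of first occurrence, or -1)
def pvFind (c : Char) : Int := PySem.Chars.find pvAlpha [c]

-- ===== PORT A =====

-- inOrder: adjacent-pair loop with early return False
def pvInOrder : List Char → Bool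
  | a :: b :: rest => if pvFind b < pvFind a then false else pvInOrder (b :: rest)
  | _ => true

-- numberOfFollowers; deck is nonempty at every call site (deck[-1] never raises)
def pvFollowers (deck : List Char) : Int :=
  let lastIdx := pvFind (deck.getLastD ' ')
  (PySem.List.pyRange lastIdx 27 1).foldl
    (fun count i =>
      let fc := PySem.List.pyGetD pvAlpha i ' '
      count + (pvFreq fc - (deck.count fc : Int))) 0

-- the while/else arm of A: try alphabet indices j, j+1, … (indexOfNext is
-- alphabet.find(..)+1 ≥ 0 at the call site, so the Nat index is exact)
def pvTryBump (pre : List Char) (ds : Int) (j : Nat) : Option (List Char) :=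
  if _h : j < 27 then
    let c := pvAlpha.getD j ' '
    let cand := pre ++ [c]
    if pvInOrder cand = true ∧ (cand.count c : Int) ≤ pvFreq c ∧
        pvFollowers cand ≥ ds - (cand.length : Int)
    then some cand
    else pvTryBump pre ds (j + 1)
  else none
  termination_by 27 - j

-- the carry arm's `for c in alphabet` loop; if no letter fits, Python's outer
-- while-loop repeats this exact computation forever: `none` marks that divergence
def pvAppendScan (carried : List Char) : List Char → Option (List Char)
  | [] => none
  | c :: rest =>
    let cand := carried ++ [c]
    if pvInOrder cand = true ∧ (cand.count c : Int) ≤ pvFreq c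
    then some cand
    else pvAppendScan carried rest

def pvIncA (p : List Char) (ds : Int) : Option (List Char) :=
  if hp : p = [] then some p
  else
    let last := p.getLast hp
    match pvTryBump p.dropLast ds (pvFind last + 1).toNat with
    | some d => some d
    | none =>
      match pvIncA p.dropLast ds with
      | some carried => pvAppendScan carried pvAlpha
      | none => none
  termination_by p.length
  decreasing_by
    have := List.length_pos_of_ne_nil hp
    simp [List.length_dropLast]; omega

def incrementDeckOrdered (predeck : String) (deckSize : Int) : Option String :=
  (pvIncA predeck.toList deckSize).map String.ofList

-- ===== PORT B =====

-- _tally: cnt[ch] = cnt.get(ch, 0) + 1 loop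
def pvTally (chars : List Char) : PySem.Dict Char Int :=
  chars.foldl (fun cnt ch => cnt.insert ch (cnt.getD ch 0 + 1)) PySem.Dict.empty

-- _ordered: ranks list, all adjacent pairs non-decreasing
def pvOrdered (chars : List Char) : Bool :=
  let ranks := chars.map pvFind
  (ranks.zip ranks.tail).all fun ab => decide (ab.1 ≤ ab.2)

-- _followers: alphabet[j:] slice with j ≥ 0 is List.drop j
def pvFollow (cnt : PySem.Dict Char Int) (j : Nat) : Int :=
  ((pvAlpha.drop j).map (fun c => pvFreq c - cnt.getD c 0)).sum

def pvBumpLoop (cnt : PySem.Dict Char Int) (n ds : Int) (j : Nat) : Option Char :=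
  if _h : j < 27 then
    let c := pvAlpha.getD j ' '
    if cnt.getD c 0 + 1 ≤ pvFreq c ∧ pvFollow cnt j - 1 ≥ ds - n
    then some c
    else pvBumpLoop cnt n ds (j + 1)
  else none
  termination_by 27 - j

-- _bump; max(start, floor, 0) ≥ 0 so the Nat start index is exact
def pvBump (pre : List Char) (start ds : Int) : Option Char :=
  if pvOrdered pre = false then none
  else
    let cnt := pvTally pre
    let n : Int := (pre.length : Int) + 1
    let floor : Int := match pre.getLast? with | some l => pvFind l | none => -1
    pvBumpLoop cnt n ds (max (max start floor) 0).toNat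

def pvExtLoop (cnt : PySem.Dict Char Int) (j : Nat) : Option Char :=
  if _h : j < 27 then
    let c := pvAlpha.getD j ' '
    if cnt.getD c 0 < pvFreq c then some c else pvExtLoop cnt (j + 1)
  else none
  termination_by 27 - j

def pvExtend (cur : List Char) : Option Char :=
  let cnt := pvTally cur
  let floor : Int := match cur.getLast? with | some l => pvFind l | none => -1
  pvExtLoop cnt (max floor 0).toNat

-- carry phase: pop from the right until one position can be bumped
def pvCarryLoop (ds : Int) (cur : List Char) (dropped : Nat) : List Char × Nat :=
  match cur with
  | [] => ([], dropped)
  | a :: rest =>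
    match pvBump (a :: rest).dropLast (pvFind ((a :: rest).getLast (by simp)) + 1) ds with
    | some c => ((a :: rest).dropLast ++ [c], dropped)
    | none => pvCarryLoop ds (a :: rest).dropLast (dropped + 1)
  termination_by cur.length
  decreasing_by simp

-- extend phase: append the smallest admissible letter once per dropped position
def pvExtendLoop (cur : List Char) (dropped : Nat) : Option (List Char) :=
  match dropped with
  | 0 => some cur
  | k + 1 =>
    match pvExtend cur with
    | none => none
    | some c => pvExtendLoop (cur ++ [c]) k

def incrementDeckOrdered_alt (predeck : String) (deckSize : Int) : Option String :=
  if predeck.toList.isEmpty then some predeck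
  else
    let ck := pvCarryLoop deckSize predeck.toList 0
    (pvExtendLoop ck.1 ck.2).map String.ofList

-- ===== PRECONDITION & SPEC =====

-- Helpers for Pre_ only (closed-form arithmetic over the input; they do not touch the ports):

-- q is nondecreasing in alphabet rank
def pvPreOrd (q : List Char) : Bool :=
  (q.zip q.tail).all fun ab => decide (pvFind ab.1 ≤ pvFind ab.2)

-- at position k (1-based), the least alphabet index j strictly above the rank of the
-- k-th character (and at least the rank of the character before it) whose letter is
-- below its frequency cap in the prefix and leaves ≥ deckSize - k tiles at rank ≥ j
def pvPreBump (p : List Char) (ds : Int) (k : Nat) : Option Nat :=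
  let q := p.take (k - 1)
  if pvPreOrd q then
    let lo : Int :=
      max (max (pvFind (p.getD (k - 1) ' ') + 1)
               (match q.getLast? with | some l => pvFind l | none => 0)) 0
    (List.range 27).find? (fun j =>
      decide (lo ≤ (j : Int)) &&
      decide ((q.count (pvAlpha.getD j ' ') : Int) + 1 ≤ pvFreq (pvAlpha.getD j ' ')) &&
      decide (((pvAlpha.drop j).map (fun d => pvFreq d - (q.count d : Int))).sum - 1 ≥ ds - (k : Int)))
  else none

-- Pre_ holds exactly on the inputs where the Python A terminates.  Outside it A RETURNS
-- NOTHING: its carry branch recomputes the same failing `for c in alphabet` scan forever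
-- (e.g. on ('Z_Z_', 3)), so no returning input is excluded.  The formula is the direct
-- termination characterisation: at the highest position k whose candidate scan admits a
-- letter (index j), the unused tile supply at rank ≥ j must refill the n - k dropped
-- positions; if no position admits a letter, the deck is rebuilt from scratch, which
-- needs n ≤ 100 (the whole tile supply).
def Pre_incrementDeckOrdered (predeck : String) (deckSize : Int) : Prop :=
  (let p := predeck.toList
   let n := p.length
   match (((List.range n).map (· + 1)).reverse.find?
            (fun k => (pvPreBump p deckSize k).isSome)) with
   | some k =>
     match pvPreBump p deckSize k with
     | some j =>
       let b := p.take (k - 1) ++ [pvAlpha.getD j ' ']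
       decide ((((pvAlpha.drop j).map (fun d => max 0 (pvFreq d - (b.count d : Int)))).sum)
                 ≥ (n : Int) - (k : Int))
     | none => false
   | none => decide ((n : Int) ≤ 100)) = true

instance (predeck : String) (deckSize : Int) : Decidable (Pre_incrementDeckOrdered predeck deckSize) := by
  unfold Pre_incrementDeckOrdered; infer_instance

def pvWitness_incrementDeckOrdered : String × Int := ("ABC", 7)

def Spec_incrementDeckOrdered (predeck : String) (deckSize : Int) (out : Option String) : Prop :=
  out = incrementDeckOrdered_alt predeck deckSize

instance (predeck : String) (deckSize : Int) (out : Option String) : Decidable (Spec_incrementDeckOrdered predeck deckSize out) := by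
  unfold Spec_incrementDeckOrdered; infer_instance

-- ===== CLAIM (what is proved, stated in full; the proofs are below) =====
def Claim_equal_incrementDeckOrdered : Prop := ∀ (predeck : String) (deckSize : Int), Dom_incrementDeckOrdered predeck deckSize → Pre_incrementDeckOrdered predeck deckSize → Spec_incrementDeckOrdered predeck deckSize (incrementDeckOrdered predeck deckSize)

-- ===== LEMMAS AND PROOFS =====

-- finite facts about the 27-letter alphabet
lemma pv_find_getD (j : Fin 27) : pvFind (pvAlpha.getD j ' ') = (j : Int) := by
  revert j; decide

lemma pv_count_drop (j : Fin 27) : (pvAlpha.drop j).count (pvAlpha.getD j ' ') = 1 := by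
  revert j; decide

lemma pv_drop_cons (j : Fin 27) :
    pvAlpha.drop j = pvAlpha.getD j ' ' :: pvAlpha.drop (j + 1) := by
  revert j; decide

lemma pv_find_mem (c : Char) (h : c ∈ pvAlpha) : 0 ≤ pvFind c ∧ pvFind c < 27 := by
  fin_cases h <;> decide

lemma pv_find_ge (c : Char) : -1 ≤ pvFind c :=
  PySem.Chars.neg_one_le_find pvAlpha [c]

lemma pv_find_lt (c : Char) : pvFind c < 27 := by
  have hle : pvFind c ≤ (pvAlpha.length : Int) := PySem.Chars.find_le_length pvAlpha [c]
  rcases lt_or_eq_of_le hle with h | h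
  · simpa [pvAlpha] using h
  · exfalso
    have h0 : 0 ≤ pvFind c := by rw [h]; positivity
    have hs := (PySem.Chars.find_spec h0).1
    rw [show PySem.Chars.find pvAlpha [c] = pvFind c from rfl, h] at hs
    simp [pvAlpha] at hs

-- tally is the letter count
lemma pv_tally_getD (l : List Char) (c : Char) :
    (pvTally l).getD c 0 = (l.count c : Int) := by
  simp [pvTally, PySem.Dict.getD_foldl_insert_add_one, PySem.Dict.getD_empty]

-- one-step unfoldings of the two order predicates
lemma pv_inOrder_cons (a b : Char) (r : List Char) :
    pvInOrder (a :: b :: r) = if pvFind b < pvFind a then false else pvInOrder (b :: r) := rfl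

lemma pv_ordered_cons (a b : Char) (r : List Char) :
    pvOrdered (a :: b :: r) = (decide (pvFind a ≤ pvFind b) && pvOrdered (b :: r)) := rfl

-- the two order predicates agree
lemma pv_inOrder_eq_ordered (l : List Char) : pvInOrder l = pvOrdered l := by
  induction l using pvInOrder.induct with
  | case1 a b rest h =>
      rw [pv_inOrder_cons, if_pos h, pv_ordered_cons]
      have hd : decide (pvFind a ≤ pvFind b) = false := decide_eq_false (by omega)
      simp [hd]
  | case2 a b rest h ih =>
      rw [pv_inOrder_cons, if_neg h, ih, pv_ordered_cons]
      have hd : decide (pvFind a ≤ pvFind b) = true := decide_eq_true (by omega)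
      rw [hd, Bool.true_and]
  | case3 t h =>
      match t, h with
      | [], _ => rfl
      | [a], _ => rfl
      | a :: b :: rest, h => exact absurd rfl (h a b rest)

-- appending one letter to the order check
lemma pv_inOrder_append (pre : List Char) (c : Char) :
    pvInOrder (pre ++ [c]) =
      (pvOrdered pre && decide ((match pre.getLast? with
        | some l => pvFind l | none => -1) ≤ pvFind c)) := by
  induction pre using pvInOrder.induct with
  | case1 a b rest h =>
      rw [List.cons_append, List.cons_append, pv_inOrder_cons, if_pos h, pv_ordered_cons]
      have hd : decide (pvFind a ≤ pvFind b) = false := decide_eq_false (by omega)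
      simp [hd]
  | case2 a b rest h ih =>
      simp only [List.cons_append] at ih ⊢
      rw [pv_inOrder_cons, if_neg h, ih, pv_ordered_cons, List.getLast?_cons_cons]
      have hd : decide (pvFind a ≤ pvFind b) = true := decide_eq_true (by omega)
      rw [hd, Bool.true_and]
  | case3 t h =>
      match t, h with
      | [], _ =>
          have := pv_find_ge c
          simp [pvInOrder, pvOrdered]
          exact this
      | [a], _ =>
          simp only [List.singleton_append, pvInOrder, pvOrdered, List.map_cons,
            List.map_nil, List.tail_cons, List.zip_cons_cons, List.all_cons,
            List.getLast?_singleton]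
          by_cases h2 : pvFind c < pvFind a
          · rw [if_pos h2]; simp; omega
          · rw [if_neg h2]; simp; omega
      | a :: b :: rest, h => exact absurd rfl (h a b rest)

-- followers of pre ++ [alphabet[j]] in terms of the tally of pre
lemma pv_followers_append (pre : List Char) (j : Fin 27) :
    pvFollowers (pre ++ [pvAlpha.getD j ' ']) = pvFollow (pvTally pre) j - 1 := by
  have h27 : (27 : Int) = (pvAlpha.length : Int) := by decide
  have hfc : pvFind (pvAlpha.getD j ' ') = (j : Int) := pv_find_getD j
  have hcd : (pvAlpha.drop j).count (pvAlpha.getD j ' ') = 1 := pv_count_drop j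
  rw [pvFollowers]
  simp only [List.getLastD_concat]
  rw [hfc, h27]
  rw [PySem.List.foldl_pyRange_pyGetD' pvAlpha ' '
    (fun acc ch => acc + (pvFreq ch - ((pre ++ [pvAlpha.getD j ' ']).count ch : Int))) 0
    (Int.natCast_nonneg j)]
  rw [PySem.List.foldl_add (List.drop ((j:Nat):Int).toNat pvAlpha)
    (fun ch => pvFreq ch - ((pre ++ [pvAlpha.getD j ' ']).count ch : Int)) 0]
  rw [pvFollow]
  simp only [pv_tally_getD, Int.toNat_natCast, zero_add]
  generalize hg : pvAlpha.getD (j:Nat) ' ' = x at *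
  have hcount : ∀ ch : Char, (pvFreq ch - ((pre ++ [x]).count ch : Int))
      = (pvFreq ch - (pre.count ch : Int)) + (-(if ch = x then (1:Int) else 0)) := by
    intro ch
    rw [List.count_append]
    push_cast
    by_cases h : ch = x
    · subst h; simp; omega
    · have h2 : ¬ (x = ch) := fun hh => h hh.symm
      simp [h, h2]
  rw [List.map_congr_left (fun ch _ => hcount ch)]
  rw [PySem.List.sum_map_add_int]
  have hx : (fun ch => -(if ch = x then (1:Int) else 0))
      = (fun ch : Char => (-1:Int) * (if (ch == x) = true then (1:Int) else 0)) := by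
    funext ch; by_cases h : ch = x <;> simp [h]
  rw [hx, List.sum_map_mul_left, PySem.List.sum_map_ite_one_zero (fun ch => ch == x)]
  rw [show List.countP (fun ch => ch == x) (List.drop (j:Nat) pvAlpha)
      = (pvAlpha.drop j).count x from rfl]
  rw [hcd]
  omega

-- scan equivalence, aligned part
lemma pv_bump_align (pre : List Char) (ds : Int) (hord : pvOrdered pre = true)
    (fl : Int) (hfl : fl = (match pre.getLast? with | some l => pvFind l | none => -1)) :
    ∀ j : Nat, fl ≤ (j : Int) →
      pvTryBump pre ds j =
        (pvBumpLoop (pvTally pre) ((pre.length : Int) + 1) ds j).map (pre ++ [·]) := by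
  suffices H : ∀ (n j : Nat), 27 - j ≤ n → fl ≤ (j : Int) →
      pvTryBump pre ds j =
        (pvBumpLoop (pvTally pre) ((pre.length : Int) + 1) ds j).map (pre ++ [·]) by
    exact fun j hj => H 27 j (by omega) hj
  intro n
  induction n with
  | zero =>
      intro j h1 _
      have hj : ¬ j < 27 := by omega
      rw [pvTryBump, pvBumpLoop]
      simp only [dif_neg hj, Option.map_none]
  | succ n ihn =>
      intro j h1 h2
      by_cases hj : j < 27
      · have hcond : (pvInOrder (pre ++ [pvAlpha.getD j ' ']) = true ∧
            (((pre ++ [pvAlpha.getD j ' ']).count (pvAlpha.getD j ' ') : Int) ≤ pvFreq (pvAlpha.getD j ' ')) ∧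
            pvFollowers (pre ++ [pvAlpha.getD j ' ']) ≥ ds - (((pre ++ [pvAlpha.getD j ' ']).length : Int)))
          ↔ ((pvTally pre).getD (pvAlpha.getD j ' ') 0 + 1 ≤ pvFreq (pvAlpha.getD j ' ') ∧
            pvFollow (pvTally pre) j - 1 ≥ ds - ((pre.length : Int) + 1)) := by
          have hordap : pvInOrder (pre ++ [pvAlpha.getD j ' ']) = true := by
            rw [pv_inOrder_append, hord, Bool.true_and, decide_eq_true_eq, ← hfl,
              pv_find_getD ⟨j, hj⟩]
            exact h2
          have hcnt : (((pre ++ [pvAlpha.getD j ' ']).count (pvAlpha.getD j ' ') : Int))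
              = (pvTally pre).getD (pvAlpha.getD j ' ') 0 + 1 := by
            rw [pv_tally_getD, List.count_append]
            push_cast
            simp
          have hfol : pvFollowers (pre ++ [pvAlpha.getD j ' '])
              = pvFollow (pvTally pre) j - 1 := pv_followers_append pre ⟨j, hj⟩
          have hlen : (((pre ++ [pvAlpha.getD j ' ']).length : Int)) = (pre.length : Int) + 1 := by
            simp
          rw [hordap, hcnt, hfol, hlen]
          tauto
        rw [pvTryBump, pvBumpLoop]
        simp only [dif_pos hj]
        by_cases hc : ((pvTally pre).getD (pvAlpha.getD j ' ') 0 + 1 ≤ pvFreq (pvAlpha.getD j ' ') ∧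
            pvFollow (pvTally pre) j - 1 ≥ ds - ((pre.length : Int) + 1))
        · rw [if_pos (hcond.mpr hc), if_pos hc, Option.map_some]
        · rw [if_neg (fun hh => hc (hcond.mp hh)), if_neg hc]
          exact ihn (j + 1) (by omega) (by push_cast; omega)
      · rw [pvTryBump, pvBumpLoop]
        simp only [dif_neg hj, Option.map_none]

-- scan equivalence, unordered prefix: everything fails
lemma pv_bump_unordered (pre : List Char) (ds : Int) (hord : pvOrdered pre = false) :
    ∀ j : Nat, pvTryBump pre ds j = none := by
  suffices H : ∀ (n j : Nat), 27 - j ≤ n → pvTryBump pre ds j = none by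
    exact fun j => H 27 j (by omega)
  intro n
  induction n with
  | zero =>
      intro j h1
      have hj : ¬ j < 27 := by omega
      rw [pvTryBump]
      simp only [dif_neg hj]
  | succ n ihn =>
      intro j h1
      by_cases hj : j < 27
      · rw [pvTryBump]
        simp only [dif_pos hj]
        rw [if_neg]
        · exact ihn (j + 1) (by omega)
        · intro hh
          rw [pv_inOrder_append, hord, Bool.false_and] at hh
          exact absurd hh.1 (by simp)
      · rw [pvTryBump]
        simp only [dif_neg hj]

-- scan equivalence, skipped part below the floor: climb to the floor
lemma pv_bump_skip (pre : List Char) (ds : Int) (hord : pvOrdered pre = true)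
    (fl : Int) (hfl : fl = (match pre.getLast? with | some l => pvFind l | none => -1))
    (hfl27 : fl < 27) :
    ∀ j : Nat, (j : Int) ≤ fl → pvTryBump pre ds j = pvTryBump pre ds fl.toNat := by
  suffices H : ∀ (n j : Nat), fl.toNat - j ≤ n → (j : Int) ≤ fl → pvTryBump pre ds j = pvTryBump pre ds fl.toNat by
    exact fun j hj => H fl.toNat j (by omega) hj
  intro n
  induction n with
  | zero =>
      intro j h1 h2
      have : j = fl.toNat := by omega
      rw [this]
  | succ n ihn =>
      intro j h1 h2
      by_cases hje : j = fl.toNat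
      · rw [hje]
      · have hjlt : (j : Int) < fl := by omega
        have hj : j < 27 := by omega
        rw [pvTryBump]
        simp only [dif_pos hj]
        rw [if_neg]
        · exact ihn (j + 1) (by omega) (by omega)
        · intro hh
          rw [pv_inOrder_append, ← hfl, pv_find_getD ⟨j, hj⟩] at hh
          have := hh.1
          simp only [Bool.and_eq_true, decide_eq_true_eq] at this
          omega

-- A's index scan equals B's _bump
lemma pv_bump_eq (pre : List Char) (s ds : Int) (hs : 0 ≤ s) :
    pvTryBump pre ds s.toNat = (pvBump pre s ds).map (pre ++ [·]) := by
  have hflge : -1 ≤ (match pre.getLast? with | some l => pvFind l | none => (-1:Int)) := by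
    cases pre.getLast? with
    | some l => exact pv_find_ge l
    | none => simp
  have hfllt : (match pre.getLast? with | some l => pvFind l | none => (-1:Int)) < 27 := by
    cases pre.getLast? with
    | some l => exact pv_find_lt l
    | none => simp
  by_cases hord : pvOrdered pre = true
  · rw [show pvBump pre s ds = pvBumpLoop (pvTally pre) ((pre.length : Int) + 1) ds
        (max (max s (match pre.getLast? with | some l => pvFind l | none => -1)) 0).toNat from by
      rw [pvBump, if_neg (by rw [hord]; simp)]]
    generalize hfl : (match pre.getLast? with | some l => pvFind l | none => (-1:Int)) = fl at *
    by_cases hcase : fl ≤ s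
    · have hm : (max (max s fl) 0).toNat = s.toNat := by omega
      rw [hm]
      exact pv_bump_align pre ds hord fl hfl.symm s.toNat (by omega)
    · have hm : (max (max s fl) 0).toNat = fl.toNat := by omega
      rw [hm, pv_bump_skip pre ds hord fl hfl.symm hfllt s.toNat (by omega)]
      exact pv_bump_align pre ds hord fl hfl.symm fl.toNat (by omega)
  · have hordf : pvOrdered pre = false := by
      cases h : pvOrdered pre
      · rfl
      · exact absurd h hord
    rw [pvBump, if_pos (by rw [hordf]), pv_bump_unordered pre ds hordf s.toNat, Option.map_none]

-- result shape of a successful scan / append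
def pvGood (d : List Char) : Prop :=
  pvInOrder d = true ∧ ∀ l, d.getLast? = some l → 0 ≤ pvFind l

-- append-scan equivalence, aligned part
lemma pv_app_align (carried : List Char) (hord : pvOrdered carried = true)
    (fl : Int) (hfl : fl = (match carried.getLast? with | some l => pvFind l | none => -1)) :
    ∀ j : Nat, fl ≤ (j : Int) →
      pvAppendScan carried (pvAlpha.drop j) =
        (pvExtLoop (pvTally carried) j).map (carried ++ [·]) := by
  suffices H : ∀ (n j : Nat), 27 - j ≤ n → fl ≤ (j : Int) →
      pvAppendScan carried (pvAlpha.drop j) =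
        (pvExtLoop (pvTally carried) j).map (carried ++ [·]) by
    exact fun j hj => H 27 j (by omega) hj
  intro n
  induction n with
  | zero =>
      intro j h1 _
      have hj : ¬ j < 27 := by omega
      have hd : pvAlpha.drop j = [] := List.drop_eq_nil_of_le (by simp [pvAlpha]; omega)
      rw [hd, pvExtLoop]
      simp only [dif_neg hj, Option.map_none]
      rfl
  | succ n ihn =>
      intro j h1 h2
      by_cases hj : j < 27
      · rw [pv_drop_cons ⟨j, hj⟩]
        have hordap : pvInOrder (carried ++ [pvAlpha.getD j ' ']) = true := by
          rw [pv_inOrder_append, hord, Bool.true_and, decide_eq_true_eq, ← hfl,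
            pv_find_getD ⟨j, hj⟩]
          exact h2
        have hcnt : (((carried ++ [pvAlpha.getD j ' ']).count (pvAlpha.getD j ' ') : Int))
            = (pvTally carried).getD (pvAlpha.getD j ' ') 0 + 1 := by
          rw [pv_tally_getD, List.count_append]
          push_cast
          simp
        have hcond : (pvInOrder (carried ++ [pvAlpha.getD j ' ']) = true ∧
            (((carried ++ [pvAlpha.getD j ' ']).count (pvAlpha.getD j ' ') : Int) ≤ pvFreq (pvAlpha.getD j ' ')))
          ↔ ((pvTally carried).getD (pvAlpha.getD j ' ') 0 < pvFreq (pvAlpha.getD j ' ')) := by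
          rw [hordap, hcnt]
          constructor
          · intro hh; omega
          · intro hh; exact ⟨rfl, by omega⟩
        rw [pvAppendScan, pvExtLoop]
        simp only [dif_pos hj]
        by_cases hc : (pvTally carried).getD (pvAlpha.getD j ' ') 0 < pvFreq (pvAlpha.getD j ' ')
        · rw [if_pos (hcond.mpr hc), if_pos hc, Option.map_some]
        · rw [if_neg (fun hh => hc (hcond.mp hh)), if_neg hc]
          exact ihn (j + 1) (by omega) (by push_cast; omega)
      · have hd : pvAlpha.drop j = [] := List.drop_eq_nil_of_le (by simp [pvAlpha]; omega)
        rw [hd, pvExtLoop]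
        simp only [dif_neg hj, Option.map_none]
        rfl

-- append-scan equivalence, skipped part below the floor
lemma pv_app_skip (carried : List Char) (hord : pvOrdered carried = true)
    (fl : Int) (hfl : fl = (match carried.getLast? with | some l => pvFind l | none => -1))
    (hfl27 : fl < 27) :
    ∀ j : Nat, (j : Int) ≤ fl →
      pvAppendScan carried (pvAlpha.drop j) = pvAppendScan carried (pvAlpha.drop fl.toNat) := by
  suffices H : ∀ (n j : Nat), fl.toNat - j ≤ n → (j : Int) ≤ fl →
      pvAppendScan carried (pvAlpha.drop j) = pvAppendScan carried (pvAlpha.drop fl.toNat) by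
    exact fun j hj => H fl.toNat j (by omega) hj
  intro n
  induction n with
  | zero =>
      intro j h1 h2
      have : j = fl.toNat := by omega
      rw [this]
  | succ n ihn =>
      intro j h1 h2
      by_cases hje : j = fl.toNat
      · rw [hje]
      · have hjlt : (j : Int) < fl := by omega
        have hj : j < 27 := by omega
        rw [pv_drop_cons ⟨j, hj⟩, pvAppendScan]
        rw [if_neg]
        · exact ihn (j + 1) (by omega) (by omega)
        · intro hh
          rw [pv_inOrder_append, ← hfl, pv_find_getD ⟨j, hj⟩] at hh
          have := hh.1
          simp only [Bool.and_eq_true, decide_eq_true_eq] at this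
          omega

-- A's append scan equals B's _extend on a good deck
lemma pv_append_eq (carried : List Char) (hg : pvGood carried) :
    pvAppendScan carried pvAlpha = (pvExtend carried).map (carried ++ [·]) := by
  have hord : pvOrdered carried = true := by
    rw [← pv_inOrder_eq_ordered]; exact hg.1
  rw [show pvExtend carried = pvExtLoop (pvTally carried)
      (max (match carried.getLast? with | some l => pvFind l | none => -1) 0).toNat from by
    rw [pvExtend]]
  rw [show pvAlpha = pvAlpha.drop 0 from rfl]
  cases hL : carried.getLast? with
  | none =>
      simp only [hL]
      exact pv_app_align carried hord (-1) (by rw [hL]) 0 (by omega)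
  | some l =>
      simp only [hL]
      have h0 : 0 ≤ pvFind l := hg.2 l hL
      have hlt : pvFind l < 27 := pv_find_lt l
      have hm : (max (pvFind l) 0).toNat = (pvFind l).toNat := by omega
      rw [hm]
      rw [pv_app_skip carried hord (pvFind l) (by rw [hL]) hlt 0 (by omega)]
      exact pv_app_align carried hord (pvFind l) (by rw [hL]) (pvFind l).toNat (by omega)

lemma pv_trybump_good (pre : List Char) (ds : Int) :
    ∀ (j : Nat) (d : List Char), pvTryBump pre ds j = some d → pvGood d := by
  suffices H : ∀ (n j : Nat), 27 - j ≤ n → ∀ d, pvTryBump pre ds j = some d → pvGood d by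
    exact fun j d => H 27 j (by omega) d
  intro n
  induction n with
  | zero =>
      intro j h1 d hd
      have hj : ¬ j < 27 := by omega
      rw [pvTryBump] at hd
      simp only [dif_neg hj] at hd
      exact absurd hd (by simp)
  | succ n ihn =>
      intro j h1 d hd
      by_cases hj : j < 27
      · rw [pvTryBump] at hd
        simp only [dif_pos hj] at hd
        by_cases hc : (pvInOrder (pre ++ [pvAlpha.getD j ' ']) = true ∧
            (((pre ++ [pvAlpha.getD j ' ']).count (pvAlpha.getD j ' ') : Int) ≤ pvFreq (pvAlpha.getD j ' ')) ∧
            pvFollowers (pre ++ [pvAlpha.getD j ' ']) ≥ ds - (((pre ++ [pvAlpha.getD j ' ']).length : Int)))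
        · rw [if_pos hc] at hd
          cases hd
          refine ⟨hc.1, fun l hl => ?_⟩
          rw [List.getLast?_concat] at hl
          cases hl
          rw [pv_find_getD ⟨j, hj⟩]
          positivity
        · rw [if_neg hc] at hd
          exact ihn (j + 1) (by omega) d hd
      · rw [pvTryBump] at hd
        simp only [dif_neg hj] at hd
        exact absurd hd (by simp)

lemma pv_appscan_good (carried : List Char) :
    ∀ (cs : List Char), (∀ c ∈ cs, 0 ≤ pvFind c) →
      ∀ d, pvAppendScan carried cs = some d → pvGood d := by
  intro cs
  induction cs with
  | nil => intro _ d hd; simp [pvAppendScan] at hd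
  | cons c rest ih =>
      intro hcs d hd
      rw [pvAppendScan] at hd
      by_cases hc : (pvInOrder (carried ++ [c]) = true ∧
          (((carried ++ [c]).count c : Int) ≤ pvFreq c))
      · rw [if_pos hc] at hd
        cases hd
        refine ⟨hc.1, fun l hl => ?_⟩
        rw [List.getLast?_concat] at hl
        cases hl
        exact hcs c List.mem_cons_self
      · rw [if_neg hc] at hd
        exact ih (fun x hx => hcs x (List.mem_cons_of_mem c hx)) d hd

lemma pv_alpha_find_nonneg : ∀ c ∈ pvAlpha, 0 ≤ pvFind c :=
  fun c hc => (pv_find_mem c hc).1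

lemma pv_incA_good (p : List Char) (ds : Int) :
    ∀ d, pvIncA p ds = some d → pvGood d := by
  suffices H : ∀ (n : Nat) (p : List Char), p.length ≤ n →
      ∀ d, pvIncA p ds = some d → pvGood d by
    exact H p.length p le_rfl
  intro n
  induction n with
  | zero =>
      intro p hl d hd
      have hp : p = [] := List.eq_nil_of_length_eq_zero (by omega)
      subst hp
      rw [pvIncA] at hd
      simp only [dif_pos rfl] at hd
      cases hd
      exact ⟨rfl, fun l hl => by simp at hl⟩
  | succ n ihn =>
      intro p hl d hd
      by_cases hp : p = []
      · subst hp
        rw [pvIncA] at hd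
        simp only [dif_pos rfl] at hd
        cases hd
        exact ⟨rfl, fun l hl => by simp at hl⟩
      · rw [pvIncA] at hd
        simp only [dif_neg hp] at hd
        cases htb : pvTryBump p.dropLast ds (pvFind (p.getLast hp) + 1).toNat with
        | some d' =>
            rw [htb] at hd
            cases hd
            exact pv_trybump_good p.dropLast ds _ _ htb
        | none =>
            rw [htb] at hd
            cases hA : pvIncA p.dropLast ds with
            | none => rw [hA] at hd; cases hd
            | some carried =>
                rw [hA] at hd
                exact pv_appscan_good carried pvAlpha pv_alpha_find_nonneg d hd

lemma pv_carry_shift (ds : Int) (cur : List Char) (k : Nat) :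
    pvCarryLoop ds cur k = ((pvCarryLoop ds cur 0).1, (pvCarryLoop ds cur 0).2 + k) := by
  suffices H : ∀ (n : Nat) (cur : List Char), cur.length ≤ n → ∀ k,
      pvCarryLoop ds cur k = ((pvCarryLoop ds cur 0).1, (pvCarryLoop ds cur 0).2 + k) by
    exact H cur.length cur le_rfl k
  intro n
  induction n with
  | zero =>
      intro cur hl k
      have hp : cur = [] := List.eq_nil_of_length_eq_zero (by omega)
      subst hp
      simp [pvCarryLoop]
  | succ n ihn =>
      intro cur hl k
      cases cur with
      | nil => simp [pvCarryLoop]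
      | cons a rest =>
          rw [pvCarryLoop, pvCarryLoop]
          cases hb : pvBump ((a :: rest).dropLast) (pvFind ((a :: rest).getLast (by simp)) + 1) ds with
          | some c => simp
          | none =>
              simp only []
              have hlen : (a :: rest).dropLast.length ≤ n := by
                simp at hl ⊢; omega
              rw [ihn _ hlen (k + 1), ihn _ hlen 1]
              simp
              omega

lemma pv_extend_succ (k : Nat) :
    ∀ cur : List Char, pvExtendLoop cur (k + 1) =
      (pvExtendLoop cur k).bind (fun d => (pvExtend d).map (d ++ [·])) := by
  induction k with
  | zero =>
      intro cur
      cases h : pvExtend cur <;> simp [pvExtendLoop, h]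
  | succ k ih =>
      intro cur
      cases h : pvExtend cur with
      | none =>
          rw [show pvExtendLoop cur (k + 1 + 1) = (match pvExtend cur with
              | none => none
              | some c => pvExtendLoop (cur ++ [c]) (k + 1)) from rfl, h]
          rw [show pvExtendLoop cur (k + 1) = (match pvExtend cur with
              | none => none
              | some c => pvExtendLoop (cur ++ [c]) k) from rfl, h]
          rfl
      | some c =>
          rw [show pvExtendLoop cur (k + 1 + 1) = (match pvExtend cur with
              | none => none
              | some c => pvExtendLoop (cur ++ [c]) (k + 1)) from rfl, h]
          rw [show pvExtendLoop cur (k + 1) = (match pvExtend cur with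
              | none => none
              | some c => pvExtendLoop (cur ++ [c]) k) from rfl, h]
          exact ih (cur ++ [c])

-- the core equivalence on lists
lemma pv_main (p : List Char) (ds : Int) :
    pvIncA p ds = pvExtendLoop (pvCarryLoop ds p 0).1 (pvCarryLoop ds p 0).2 := by
  suffices H : ∀ (n : Nat) (p : List Char), p.length ≤ n →
      pvIncA p ds = pvExtendLoop (pvCarryLoop ds p 0).1 (pvCarryLoop ds p 0).2 by
    exact H p.length p le_rfl
  intro n
  induction n with
  | zero =>
      intro p hl
      have hp : p = [] := List.eq_nil_of_length_eq_zero (by omega)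
      subst hp
      rw [pvIncA]
      simp [pvCarryLoop, pvExtendLoop]
  | succ n ihn =>
      intro p hl
      cases p with
      | nil =>
          rw [pvIncA]
          simp [pvCarryLoop, pvExtendLoop]
      | cons a rest =>
          have hp : (a :: rest) ≠ [] := List.cons_ne_nil a rest
          have hlen : (a :: rest).dropLast.length ≤ n := by
            simp at hl ⊢; omega
          have hs : 0 ≤ pvFind ((a :: rest).getLast hp) + 1 := by
            have := pv_find_ge ((a :: rest).getLast hp)
            omega
          rw [pvIncA]
          simp only [dif_neg hp]
          rw [pv_bump_eq _ _ ds hs]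
          rw [pvCarryLoop]
          cases hb : pvBump ((a :: rest).dropLast) (pvFind ((a :: rest).getLast (by simp)) + 1) ds with
          | some c =>
              simp only [hb, Option.map_some]
              rfl
          | none =>
              simp only [hb, Option.map_none]
              rw [pv_carry_shift ds ((a :: rest).dropLast) 1]
              rw [pv_extend_succ]
              rw [← ihn _ hlen]
              cases hA : pvIncA ((a :: rest).dropLast) ds with
              | none => rfl
              | some carried =>
                  simp only [Option.bind_some]
                  exact pv_append_eq carried (pv_incA_good _ ds carried hA)

-- ===== VERDICT (by name: the statement is the Claim_ definition above) =====
theorem incrementDeckOrdered_spec : Claim_equal_incrementDeckOrdered := by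
  intro predeck deckSize _dom _pre
  unfold Spec_incrementDeckOrdered incrementDeckOrdered incrementDeckOrdered_alt
  rw [pv_main]
  by_cases h : predeck.toList = []
  · rw [h]
    simp only [pvCarryLoop, pvExtendLoop, List.isEmpty_nil, if_true, Option.map_some]
    rw [show predeck = String.ofList predeck.toList from (@String.ofList_toList predeck).symm, h]
  · rw [if_neg (by simpa using h)]
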